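-- pv_equiv track=rewrite | github.com/yejinee/Algorithm | 2023/2504.py | solution
-- ===== SOURCE A (Python) =====
-- def solution(str):
--     stack = []
--     mul_amt = 1
--     ans = 0
--
--     for idx, value in enumerate(str):
--         if value=='(':
--             mul_amt *= 2
--             stack.append(value)
--         elif value=='[':
--             mul_amt *= 3
--             stack.append(value)
--
--
--         elif value == ')':
--             if not stack or stack[-1]=='[':
--                 return 0
--             if stack[-1]=='(':
--                 ans += mul_amt
--             mul_amt //= 2
--             stack.pop()
--
--         else:
--             if not stack or stack[-1]=='(':
--                 return 0
--             if stack[-1]=='[':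
--                 ans += mul_amt
--             mul_amt //= 3
--             stack.pop()
--
--     if stack:
--         return 0
--
--     return ans
-- ===== SOURCE B (Python) =====
-- def solution(str):
--     # Frame stack of (opener, saved_sum): each frame remembers the partial sum of
--     # the enclosing level; values are combined on close instead of keeping a
--     # global multiplier.  (Any character other than '(', '[', ')' closes like ']',
--     # matching A.)
--     stack = []
--     cur = 0
--     for ch in str:
--         if ch == '(' or ch == '[':
--             stack.append((ch, cur))
--             cur = 0
--         else:
--             need = '(' if ch == ')' else '['
--             w = 2 if ch == ')' else 3
--             if not stack or stack[-1][0] != need: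
--                 return 0
--             _, saved = stack.pop()
--             cur = saved + w * (1 + cur)
--     if stack:
--         return 0
--     return cur
-- ===== Notes on version B (the rewrite author's own statement) =====
-- stated objective: alternative
-- what changed: Replaces A's raw bracket stack plus global running multiplier and accumulator with a frame stack of (opener, saved partial sum) pairs: each close pops a frame and combines subexpression values locally (saved + w*(1+cur)), so no multiplication/division bookkeeping and no separate answer accumulator.
import Mathlib
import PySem

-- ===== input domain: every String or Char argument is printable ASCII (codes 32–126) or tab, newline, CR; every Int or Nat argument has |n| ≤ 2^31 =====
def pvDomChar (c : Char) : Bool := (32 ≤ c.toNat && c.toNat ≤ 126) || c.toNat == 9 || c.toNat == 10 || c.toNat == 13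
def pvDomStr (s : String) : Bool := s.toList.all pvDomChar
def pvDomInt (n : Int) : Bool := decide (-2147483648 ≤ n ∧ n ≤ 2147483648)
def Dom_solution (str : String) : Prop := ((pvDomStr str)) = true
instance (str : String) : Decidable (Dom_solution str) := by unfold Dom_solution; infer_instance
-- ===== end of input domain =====

-- B replaces A's global multiplier + raw bracket stack by a frame stack of
-- (opener, saved partial sum), combining subexpression values on each close:
-- a different data structure / decomposition, same exact result (objective: alternative).

-- ===== PORT A =====
-- A's loop: stack of raw bracket chars (head = top), global multiplier, accumulator.
def solutionA_go : List Char → List Char → Int → Int → Int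
  | [], st, _, ans => if st.isEmpty then 0 + (if st.isEmpty then ans else 0) else 0
  | c :: rest, st, mul, ans =>
    if c = '(' then solutionA_go rest ('(' :: st) (mul * 2) ans
    else if c = '[' then solutionA_go rest ('[' :: st) (mul * 3) ans
    else if c = ')' then
      match st with
      | [] => 0
      | t :: st' =>
        if t = '[' then 0
        else
          solutionA_go rest st' (PySem.Int.floordiv mul 2)
            (if t = '(' then ans + mul else ans)
    else
      match st with
      | [] => 0
      | t :: st' =>
        if t = '(' then 0
        else
          solutionA_go rest st' (PySem.Int.floordiv mul 3)
            (if t = '[' then ans + mul else ans)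

def solution (str : String) : Int := solutionA_go str.toList [] 1 0

-- ===== PORT B =====
-- B's loop: frame stack of (opener, saved sum); current sum of completed siblings.
def solutionB_go : List Char → List (Char × Int) → Int → Int
  | [], fr, cur => if fr.isEmpty then cur else 0
  | c :: rest, fr, cur =>
    if c = '(' ∨ c = '[' then solutionB_go rest ((c, cur) :: fr) 0
    else
      let need : Char := if c = ')' then '(' else '['
      let w : Int := if c = ')' then 2 else 3
      match fr with
      | [] => 0
      | (o, s) :: fr' =>
        if o ≠ need then 0 else solutionB_go rest fr' (s + w * (1 + cur))

def solution_alt (str : String) : Int := solutionB_go str.toList [] 0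

-- ===== PRECONDITION & SPEC =====
def Spec_solution (str : String) (out : Int) : Prop := out = solution_alt str
instance (str : String) (out : Int) : Decidable (Spec_solution str out) := by unfold Spec_solution; infer_instance

-- ===== CLAIM (what is proved, stated in full; the proofs are below) =====
def Claim_equal_solution : Prop := ∀ (str : String), Dom_solution str → Spec_solution str (solution str)

-- ===== LEMMAS AND PROOFS =====

-- B as an Option-valued run: none exactly where Source B returns 0 by failure.
def runB : List Char → List (Char × Int) → Int → Option Int
  | [], fr, cur => if fr.isEmpty then some cur else none
  | c :: rest, fr, cur =>
    if c = '(' ∨ c = '[' then runB rest ((c, cur) :: fr) 0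
    else
      let need : Char := if c = ')' then '(' else '['
      let w : Int := if c = ')' then 2 else 3
      match fr with
      | [] => none
      | (o, s) :: fr' =>
        if o ≠ need then none else runB rest fr' (s + w * (1 + cur))

-- product of weights of the openers on the stack
def Wt : List Char → Int
  | [] => 1
  | c :: st => (if c = '(' then 2 else 3) * Wt st

-- Σ over frames of (weight product of the frames below it) * saved sum
def Sv : List (Char × Int) → Int
  | [] => 0
  | (_, s) :: fr => Wt (fr.map Prod.fst) * s + Sv fr

def OKfr (fr : List (Char × Int)) : Prop := ∀ p ∈ fr, p.1 = '(' ∨ p.1 = '['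

lemma solutionB_go_eq_runB (cs : List Char) : ∀ fr cur,
    solutionB_go cs fr cur = (runB cs fr cur).getD 0 := by
  induction cs with
  | nil => intro fr cur; cases fr <;> simp [solutionB_go, runB]
  | cons c rest ih =>
    intro fr cur
    by_cases h : c = '(' ∨ c = '['
    · simp only [solutionB_go, runB, if_pos h]; exact ih _ _
    · simp only [solutionB_go, runB, if_neg h]
      cases fr with
      | nil => simp
      | cons p fr' =>
        obtain ⟨o, s⟩ := p
        dsimp only
        split_ifs <;> simp [ih]

lemma fdiv_cancel (w W : Int) (hw : w ≠ 0) :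
    PySem.Int.floordiv (w * W) w = W := by
  have : PySem.Int.floordiv (w * W) w = Int.fdiv (w * W) w := rfl
  rw [this, Int.mul_fdiv_cancel_left _ hw]

lemma A_eq_runB (cs : List Char) : ∀ fr ans cur, OKfr fr →
    solutionA_go cs (fr.map Prod.fst) (Wt (fr.map Prod.fst)) ans =
      (match runB cs fr cur with
       | none => 0
       | some v => ans + v - (Wt (fr.map Prod.fst) * cur + Sv fr)) := by
  induction cs with
  | nil =>
    intro fr ans cur _
    cases fr with
    | nil => simp [solutionA_go, runB, Wt, Sv]
    | cons p fr' => simp [solutionA_go, runB]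
  | cons c rest ih =>
    intro fr ans cur hok
    by_cases hc1 : c = '('
    · subst hc1
      have hIH := ih (('(', cur) :: fr) ans 0
        (fun p hp => (List.mem_cons.mp hp).elim (fun h => Or.inl (by rw [h])) (hok p))
      simp only [solutionA_go, runB, List.map_cons, ne_eq, Char.reduceEq, reduceIte,
        or_self, or_false, false_or, not_false_eq_true, not_true_eq_false, ite_true,
        ite_false] at hIH ⊢
      rw [show Wt ('(' :: fr.map Prod.fst) = 2 * Wt (fr.map Prod.fst) from by simp [Wt]] at hIH
      rw [show Wt (fr.map Prod.fst) * 2 = 2 * Wt (fr.map Prod.fst) from by ring, hIH]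
      cases runB rest (('(', cur) :: fr) 0 with
      | none => rfl
      | some v => simp only [Sv, List.map_cons]; ring
    · by_cases hc2 : c = '['
      · subst hc2
        have hIH := ih (('[', cur) :: fr) ans 0
          (fun p hp => (List.mem_cons.mp hp).elim (fun h => Or.inr (by rw [h])) (hok p))
        simp only [solutionA_go, runB, List.map_cons, ne_eq, Char.reduceEq, reduceIte,
          or_self, or_false, false_or, not_false_eq_true, not_true_eq_false, ite_true,
          ite_false] at hIH ⊢
        rw [show Wt ('[' :: fr.map Prod.fst) = 3 * Wt (fr.map Prod.fst) from by simp [Wt]] at hIH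
        rw [show Wt (fr.map Prod.fst) * 3 = 3 * Wt (fr.map Prod.fst) from by ring, hIH]
        cases runB rest (('[', cur) :: fr) 0 with
        | none => rfl
        | some v => simp only [Sv, List.map_cons]; ring
      · by_cases hc3 : c = ')'
        · subst hc3
          cases fr with
          | nil => simp [solutionA_go, runB]
          | cons p fr' =>
            obtain ⟨o, s⟩ := p
            rcases hok (o, s) List.mem_cons_self with ho | ho <;> simp only at ho <;> subst ho
            · have hok' : OKfr fr' := fun p hp => hok p (List.mem_cons_of_mem _ hp)
              have hIH := ih fr' (ans + 2 * Wt (fr'.map Prod.fst)) (s + 2 * (1 + cur)) hok'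
              simp only [solutionA_go, runB, List.map_cons, ne_eq, Char.reduceEq, reduceIte,
                or_self, or_false, false_or, not_false_eq_true, not_true_eq_false, ite_true,
                ite_false]
              rw [show Wt ('(' :: fr'.map Prod.fst) = 2 * Wt (fr'.map Prod.fst) from by simp [Wt],
                fdiv_cancel 2 _ (by decide)]
              rw [hIH]
              cases runB rest fr' (s + 2 * (1 + cur)) with
              | none => rfl
              | some v => simp only [Sv, List.map_cons]; ring
            · simp [solutionA_go, runB]
        · cases fr with
          | nil =>
            simp only [solutionA_go, runB, if_neg hc1, if_neg hc2, if_neg hc3,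
              if_neg (by simp [hc1, hc2] : ¬(c = '(' ∨ c = '['))]
            rfl
          | cons p fr' =>
            obtain ⟨o, s⟩ := p
            rcases hok (o, s) List.mem_cons_self with ho | ho <;> simp only at ho <;> subst ho
            · simp [solutionA_go, runB, hc1, hc2, hc3]
            · have hok' : OKfr fr' := fun p hp => hok p (List.mem_cons_of_mem _ hp)
              have hIH := ih fr' (ans + 3 * Wt (fr'.map Prod.fst)) (s + 3 * (1 + cur)) hok'
              simp only [solutionA_go, runB, List.map_cons, ne_eq, Char.reduceEq, reduceIte,
                if_neg hc1, if_neg hc2, if_neg hc3,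
                if_neg (by simp [hc1, hc2] : ¬(c = '(' ∨ c = '[')),
                or_self, or_false, false_or, not_false_eq_true, not_true_eq_false, ite_true,
                ite_false]
              rw [show Wt ('[' :: fr'.map Prod.fst) = 3 * Wt (fr'.map Prod.fst) from by simp [Wt],
                fdiv_cancel 3 _ (by decide)]
              rw [hIH]
              cases runB rest fr' (s + 3 * (1 + cur)) with
              | none => rfl
              | some v => simp only [Sv, List.map_cons]; ring

-- ===== VERDICT (by name: the statement is the Claim_ definition above) =====
theorem solution_spec : Claim_equal_solution := by
  intro str _
  unfold Spec_solution solution solution_alt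
  rw [solutionB_go_eq_runB]
  have h := A_eq_runB str.toList [] 0 0 (by intro p hp; cases hp)
  simp only [List.map_nil, Wt, Sv] at h
  rw [h]
  cases runB str.toList [] 0 with
  | none => rfl
  | some v => simp
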